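-- pv_equiv track=rewrite | github.com/rishisoni90/Resume-Analyzer | app.py | add_missing_keywords
-- ===== SOURCE A (Python) =====
-- def add_missing_keywords(resume_text, missing_keywords):
--     """Add missing keywords to skills section"""
--     if not missing_keywords:
--         return resume_text
--
--     keywords_to_add = ', '.join([kw.capitalize() for kw in list(missing_keywords)[:10]])
--
--     lines = resume_text.split('\n')
--     new_lines = []
--     added = False
--
--     for line in lines:
--         new_lines.append(line)
--         if not added and ('CORE SKILLS' in line or 'SKILLS' in line or 'TECHNICAL SKILLS' in line):
--             new_lines.append(f"  {keywords_to_add}")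
--             added = True
--
--     if not added:
--         new_lines.insert(3, f"\nSKILLS\n{keywords_to_add}\n")
--
--     return '\n'.join(new_lines)
-- ===== SOURCE B (Python) =====
-- def add_missing_keywords(resume_text, missing_keywords):
--     """Add missing keywords to skills section"""
--     if not missing_keywords:
--         return resume_text
--
--     keywords_to_add = ', '.join(kw.capitalize() for kw in list(missing_keywords)[:10])
--
--     lines = resume_text.split('\n')
--     # the three OR'd header tests all reduce to 'SKILLS' being a substring
--     idx = next((i for i, line in enumerate(lines) if 'SKILLS' in line), None)
--     if idx is not None:
--         new_lines = lines[:idx + 1] + [f"  {keywords_to_add}"] + lines[idx + 1:]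
--     else:
--         new_lines = lines[:3] + [f"\nSKILLS\n{keywords_to_add}\n"] + lines[3:]
--
--     return '\n'.join(new_lines)
-- ===== Notes on version B (the rewrite author's own statement) =====
-- stated objective: simpler
-- what changed: Replaces the accumulator loop with its 'added' flag by a single first-index search ('SKILLS' in line subsumes the two longer header tests) followed by one slice-splice, and replaces the fallback list.insert(3,...) by the equivalent clamping slice-splice at 3.
import Mathlib
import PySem

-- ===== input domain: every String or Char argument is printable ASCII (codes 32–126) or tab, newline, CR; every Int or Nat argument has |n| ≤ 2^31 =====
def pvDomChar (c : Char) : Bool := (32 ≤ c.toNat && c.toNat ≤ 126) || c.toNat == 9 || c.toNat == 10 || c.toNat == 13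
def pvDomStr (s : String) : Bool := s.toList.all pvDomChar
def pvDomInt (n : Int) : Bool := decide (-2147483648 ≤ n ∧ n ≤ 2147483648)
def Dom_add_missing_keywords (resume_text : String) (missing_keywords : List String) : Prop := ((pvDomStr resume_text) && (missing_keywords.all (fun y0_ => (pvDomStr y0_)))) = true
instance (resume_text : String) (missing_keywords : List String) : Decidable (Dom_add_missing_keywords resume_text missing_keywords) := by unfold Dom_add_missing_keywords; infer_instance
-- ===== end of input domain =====

-- B replaces A's accumulator loop with an 'added' flag by a single first-index search
-- ('SKILLS' in line subsumes the two longer header tests) followed by one slice-splice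
-- (objective: simpler).


-- shared helper: kw.capitalize() — first char uppercased, rest lowercased (exact on ASCII)
def pyCapitalize (s : String) : String :=
  match s.toList with
  | [] => ""
  | c :: rest => String.ofList (PySem.Chars.upper [c] ++ PySem.Chars.lower rest)

-- ===== PORT A =====
def add_missing_keywords (resume_text : String) (missing_keywords : List String) : String :=
  if missing_keywords = [] then resume_text else
  let keywords_to_add := PySem.Str.join ", " ((PySem.List.slice missing_keywords none (some 10)).map pyCapitalize)
  let lines := (PySem.Str.split? resume_text "\n").getD []
  let st := lines.foldl (fun (st : List String × Bool) line =>
      let nl := st.1 ++ [line]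
      if !st.2 && (PySem.Str.isIn "CORE SKILLS" line || PySem.Str.isIn "SKILLS" line || PySem.Str.isIn "TECHNICAL SKILLS" line)
      then (nl ++ ["  " ++ keywords_to_add], true)
      else (nl, st.2)) ([], false)
  let new_lines := if !st.2 then PySem.List.insert st.1 3 ("\nSKILLS\n" ++ keywords_to_add ++ "\n") else st.1
  PySem.Str.join "\n" new_lines

-- ===== PORT B =====
def add_missing_keywords_alt (resume_text : String) (missing_keywords : List String) : String :=
  if missing_keywords = [] then resume_text else
  let keywords_to_add := PySem.Str.join ", " ((PySem.List.slice missing_keywords none (some 10)).map pyCapitalize)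
  let lines := (PySem.Str.split? resume_text "\n").getD []
  let new_lines :=
    match lines.findIdx? (fun line => PySem.Str.isIn "SKILLS" line) with
    | some i => lines.take (i + 1) ++ ["  " ++ keywords_to_add] ++ lines.drop (i + 1)
    | none => lines.take 3 ++ ["\nSKILLS\n" ++ keywords_to_add ++ "\n"] ++ lines.drop 3
  PySem.Str.join "\n" new_lines

-- ===== PRECONDITION & SPEC =====
def Spec_add_missing_keywords (resume_text : String) (missing_keywords : List String) (out : String) : Prop := out = add_missing_keywords_alt resume_text missing_keywords
instance (resume_text : String) (missing_keywords : List String) (out : String) : Decidable (Spec_add_missing_keywords resume_text missing_keywords out) := by unfold Spec_add_missing_keywords; infer_instance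

-- ===== CLAIM (what is proved, stated in full; the proofs are below) =====
def Claim_equal_add_missing_keywords : Prop := ∀ (resume_text : String) (missing_keywords : List String), Dom_add_missing_keywords resume_text missing_keywords → Spec_add_missing_keywords resume_text missing_keywords (add_missing_keywords resume_text missing_keywords)

-- ===== LEMMAS AND PROOFS =====

theorem infix_mono (line big : String) (hsub : ("SKILLS" : String).toList <:+: big.toList)
    (hb : PySem.Str.isIn big line = true) : PySem.Str.isIn "SKILLS" line = true :=
  (PySem.Str.isIn_iff_infix _ _).mpr (hsub.trans ((PySem.Str.isIn_iff_infix _ _).mp hb))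

-- the three OR'd header tests reduce to the middle one
theorem cond_reduce (line : String) :
    (PySem.Str.isIn "CORE SKILLS" line || PySem.Str.isIn "SKILLS" line || PySem.Str.isIn "TECHNICAL SKILLS" line)
      = PySem.Str.isIn "SKILLS" line := by
  cases h2 : PySem.Str.isIn "SKILLS" line with
  | true => rw [Bool.or_true, Bool.true_or]
  | false =>
    have h1 : PySem.Str.isIn "CORE SKILLS" line = false := by
      cases hb : PySem.Str.isIn "CORE SKILLS" line with
      | false => rfl
      | true => rw [infix_mono line _ (by decide) hb] at h2; exact h2
    have h3 : PySem.Str.isIn "TECHNICAL SKILLS" line = false := by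
      cases hb : PySem.Str.isIn "TECHNICAL SKILLS" line with
      | false => rfl
      | true => rw [infix_mono line _ (by decide) hb] at h2; exact h2
    rw [h1, h3]; rfl

-- A's loop once the flag is set: it only appends the remaining lines
theorem loop_true (p : String → Bool) (k : String) (lines acc : List String) :
    lines.foldl (fun (st : List String × Bool) line =>
      let nl := st.1 ++ [line]
      if !st.2 && p line
      then (nl ++ ["  " ++ k], true) else (nl, st.2)) (acc, true)
      = (acc ++ lines, true) := by
  induction lines generalizing acc with
  | nil => simp
  | cons hd t ih => simpa using ih (acc ++ [hd])

-- A's loop when no line matches: it copies the lines and the flag stays false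
theorem loop_none (p : String → Bool) (k : String) (lines acc : List String)
    (h : ∀ l ∈ lines, p l = false) :
    lines.foldl (fun (st : List String × Bool) line =>
      let nl := st.1 ++ [line]
      if !st.2 && p line
      then (nl ++ ["  " ++ k], true) else (nl, st.2)) (acc, false)
      = (acc ++ lines, false) := by
  induction lines generalizing acc with
  | nil => simp
  | cons hd t ih =>
    have hhd : p hd = false := h hd (by simp)
    have := ih (acc ++ [hd]) (fun l hl => h l (List.mem_cons_of_mem _ hl))
    simpa [hhd] using this

-- A's loop when the first match is at index i: splice after line i
theorem loop_some (p : String → Bool) (k : String) (lines : List String) (i : Nat) (acc : List String)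
    (h : lines.findIdx? p = some i) :
    lines.foldl (fun (st : List String × Bool) line =>
      let nl := st.1 ++ [line]
      if !st.2 && p line
      then (nl ++ ["  " ++ k], true) else (nl, st.2)) (acc, false)
      = (acc ++ lines.take (i + 1) ++ ["  " ++ k] ++ lines.drop (i + 1), true) := by
  induction lines generalizing acc i with
  | nil => simp at h
  | cons hd t ih =>
    rw [List.findIdx?_cons] at h
    cases hhd : p hd with
    | true =>
      simp only [hhd, if_true] at h
      obtain rfl : (0 : Nat) = i := by simpa using h
      have := loop_true p k t (acc ++ [hd] ++ ["  " ++ k])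
      simpa [hhd] using this
    | false =>
      simp only [hhd] at h
      obtain ⟨j, hj, rfl⟩ : ∃ j, t.findIdx? p = some j ∧ j + 1 = i := by
        cases hf : t.findIdx? p with
        | none => rw [hf] at h; simp at h
        | some j => rw [hf] at h; simp at h; exact ⟨j, rfl, h⟩
      have := ih j (acc ++ [hd]) hj
      simpa [hhd] using this

-- Python's list.insert(3, v) clamps: it is the slice-splice at 3
theorem insert_three {α : Type} (xs : List α) (v : α) :
    PySem.List.insert xs (3 : Int) v = xs.take 3 ++ v :: xs.drop 3 := by
  simp only [PySem.List.insert, PySem.List.sliceIndices]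
  norm_num
  have h3 : (min (3 : Int) (xs.length : Int)).toNat = min 3 xs.length := by omega
  rw [h3]
  rcases Nat.le_total 3 xs.length with h | h
  · rw [Nat.min_eq_left h]
  · rw [Nat.min_eq_right h, List.take_length, List.drop_length,
       List.take_of_length_le h, List.drop_of_length_le h]

-- ===== VERDICT (by name: the statement is the Claim_ definition above) =====
theorem add_missing_keywords_spec : Claim_equal_add_missing_keywords := by
  intro resume_text missing_keywords _
  unfold Spec_add_missing_keywords add_missing_keywords add_missing_keywords_alt
  by_cases hmk : missing_keywords = []
  · simp [hmk]
  · simp only [if_neg hmk, cond_reduce]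
    set k := PySem.Str.join ", " ((PySem.List.slice missing_keywords none (some 10)).map pyCapitalize) with hk
    set lines := (PySem.Str.split? resume_text "\n").getD [] with hl
    cases hfind : lines.findIdx? (fun line => PySem.Str.isIn "SKILLS" line) with
    | none =>
      have hall := List.findIdx?_eq_none_iff.mp hfind
      rw [loop_none _ k lines [] hall]
      simp [insert_three]
    | some i =>
      rw [loop_some _ k lines i [] hfind]
      simp
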